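-- pv_equiv track=rewrite | github.com/joycezhu1024/Web_Crawler_Script-using-Python | ParisBasicInfo.py | deleteComma
-- ===== SOURCE A (Python) =====
-- def deleteComma(text):
--     okay = False
--     res = ''
--     for c in text:
--         if(c=='"'):
--             okay= not okay
--         elif((c in {',',':','\''} )and okay):
--             c='.'
--         res+=c
--     return res
-- ===== SOURCE B (Python) =====
-- def deleteComma(text):
--     segments = text.split('"')
--     table = str.maketrans(",:'", "...")
--     return '"'.join(seg.translate(table) if i % 2 else seg
--                     for i, seg in enumerate(segments))
-- ===== Notes on version B (the rewrite author's own statement) =====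
-- stated objective: idiomatic
-- what changed: Replaces the char-by-char boolean state machine (toggle flag, result built by repeated string concatenation) with split on the double-quote character / translate odd segments via str.maketrans / rejoin; bulk C-level split/translate/join replaces the per-character Python loop.
import Mathlib
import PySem

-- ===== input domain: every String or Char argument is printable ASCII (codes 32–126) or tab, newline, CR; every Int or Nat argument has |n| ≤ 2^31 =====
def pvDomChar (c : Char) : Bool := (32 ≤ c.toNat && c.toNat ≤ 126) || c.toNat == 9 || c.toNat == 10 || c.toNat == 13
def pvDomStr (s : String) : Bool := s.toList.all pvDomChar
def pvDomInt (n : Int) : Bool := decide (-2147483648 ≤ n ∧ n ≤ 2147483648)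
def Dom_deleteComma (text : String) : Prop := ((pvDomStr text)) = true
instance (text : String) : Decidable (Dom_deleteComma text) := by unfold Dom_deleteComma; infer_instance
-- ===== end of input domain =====

-- B replaces A's char-by-char toggle state machine by split-on-'"' / translate odd segments / rejoin (idiomatic decomposition).

-- ===== PORT A =====
-- one loop step of A: toggle on '"', else replace ,:' by '.' while inside quotes, append
def stepA (st : Bool × List Char) (c : Char) : Bool × List Char :=
  if c = '"' then (!st.1, st.2 ++ [c])
  else if (c = ',' ∨ c = ':' ∨ c = '\'') ∧ st.1 = true then (st.1, st.2 ++ ['.'])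
  else (st.1, st.2 ++ [c])

def deleteComma (text : String) : String :=
  String.mk (text.toList.foldl stepA (false, [])).2

-- ===== PORT B =====
-- str.maketrans(",:'", "...") applied to one character
def trc (c : Char) : Char := if c = ',' ∨ c = ':' ∨ c = '\'' then '.' else c

-- text.split('"') on the character list (Python str.split with a one-char separator, keeps empty pieces)
def splitQ : List Char → List (List Char)
  | [] => [[]]
  | c :: rest =>
    match splitQ rest with
    | [] => [[]]
    | s :: ss => if c = '"' then [] :: s :: ss else (c :: s) :: ss

def deleteComma_alt (text : String) : String :=
  let segs := splitQ text.toList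
  String.mk (List.intercalate ['"']
    ((PySem.List.enumerate segs 0).map
      (fun p => if p.1 % 2 ≠ 0 then p.2.map trc else p.2)))

-- ===== PRECONDITION & SPEC =====
def Spec_deleteComma (text : String) (out : String) : Prop := out = deleteComma_alt text
instance (text : String) (out : String) : Decidable (Spec_deleteComma text out) := by unfold Spec_deleteComma; infer_instance

-- ===== CLAIM (what is proved, stated in full; the proofs are below) =====
def Claim_equal_deleteComma : Prop := ∀ (text : String), Dom_deleteComma text → Spec_deleteComma text (deleteComma text)

-- ===== LEMMAS AND PROOFS =====

-- the character stream A produces from start state ok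
def procA : Bool → List Char → List Char
  | _, [] => []
  | ok, c :: rest =>
    if c = '"' then c :: procA (!ok) rest
    else if (c = ',' ∨ c = ':' ∨ c = '\'') ∧ ok = true then '.' :: procA ok rest
    else c :: procA ok rest

lemma foldA (cs : List Char) : ∀ (ok : Bool) (acc : List Char),
    (cs.foldl stepA (ok, acc)).2 = acc ++ procA ok cs := by
  induction cs with
  | nil => intro ok acc; simp [procA]
  | cons c rest ih =>
    intro ok acc
    simp only [List.foldl_cons, stepA, procA]
    split_ifs with h1 h2 <;> simp [ih, List.append_assoc]

lemma splitQ_ne_nil (cs : List Char) : splitQ cs ≠ [] := by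
  induction cs with
  | nil => simp [splitQ]
  | cons c rest ih =>
    cases h : splitQ rest with
    | nil => exact absurd h ih
    | cons s ss => simp [splitQ, h]; split <;> simp

lemma intercalate_cons₂ {α : Type} (sep x y : List α) (t : List (List α)) :
    List.intercalate sep (x :: y :: t) = x ++ sep ++ List.intercalate sep (y :: t) := by
  simp [List.intercalate, List.intersperse, List.append_assoc]

lemma intercalate_cons_head {α : Type} (sep : List α) (a : α) (x : List α) (t : List (List α)) :
    List.intercalate sep ((a :: x) :: t) = a :: List.intercalate sep (x :: t) := by
  cases t with
  | nil => simp [List.intercalate]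
  | cons y t' => rw [intercalate_cons₂, intercalate_cons₂]; simp

lemma key (cs : List Char) : ∀ (ok : Bool) (n : Int), (ok = true ↔ n % 2 = 1) →
    procA ok cs = List.intercalate ['"']
      ((PySem.List.enumerate (splitQ cs) n).map
        (fun p => if p.1 % 2 ≠ 0 then p.2.map trc else p.2)) := by
  induction cs with
  | nil =>
    intro ok n h
    simp [procA, splitQ, PySem.List.enumerate, List.intercalate]
  | cons c rest ih =>
    intro ok n h
    rcases hs : splitQ rest with _ | ⟨s, ss⟩
    · exact absurd hs (splitQ_ne_nil rest)
    by_cases hq : c = '"'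
    · have hpar : (!ok) = true ↔ (n + 1) % 2 = 1 := by
        cases ok <;> simp_all <;> omega
      subst hq
      rw [show procA ok ('"' :: rest) = '"' :: procA (!ok) rest from by simp [procA],
        show splitQ ('"' :: rest) = [] :: s :: ss from by simp [splitQ, hs],
        PySem.List.enumerate_cons, List.map_cons, PySem.List.enumerate_cons,
        List.map_cons, intercalate_cons₂]
      have := ih (!ok) (n + 1) hpar
      rw [hs, PySem.List.enumerate_cons, List.map_cons] at this
      simp [this]
    · have hnz : n % 2 ≠ 0 ↔ n % 2 = 1 := by omega
      have htail := ih ok n h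
      rw [hs, PySem.List.enumerate_cons, List.map_cons] at htail
      simp only [procA, splitQ, hs, if_neg hq]
      rw [PySem.List.enumerate_cons, List.map_cons]
      by_cases hok : ok = true
      · subst hok
        have hn1 : n % 2 ≠ 0 := hnz.mpr (h.mp rfl)
        rw [if_pos hn1, List.map_cons, intercalate_cons_head]
        rw [if_pos hn1] at htail
        by_cases hc : c = ',' ∨ c = ':' ∨ c = '\''
        · rw [if_pos ⟨hc, rfl⟩, show trc c = '.' from if_pos hc]
          exact congrArg (List.cons '.') htail
        · rw [if_neg (fun hh => hc hh.1), show trc c = c from if_neg hc]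
          exact congrArg (List.cons c) htail
      · have hok' : ok = false := by cases ok; rfl; exact absurd rfl hok
        subst hok'
        have hn0 : ¬ n % 2 ≠ 0 := fun hh => hok (h.mpr (hnz.mp hh))
        rw [if_neg hn0, intercalate_cons_head]
        rw [if_neg hn0] at htail
        rw [if_neg (fun hh => Bool.false_ne_true hh.2)]
        exact congrArg (List.cons c) htail

-- ===== VERDICT (by name: the statement is the Claim_ definition above) =====
theorem deleteComma_spec : Claim_equal_deleteComma := by
  intro text _
  show deleteComma text = deleteComma_alt text
  unfold deleteComma deleteComma_alt
  rw [foldA, key text.toList false 0 (by simp)]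
  rfl
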